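-- pv_equiv track=rewrite | github.com/mgaldino/treaties-ideal-point | scripts/python/acquire_wipo_treaties.py | _find_member_rows
-- ===== SOURCE A (Python) =====
-- def _find_member_rows(all_rows: list[list[str]]) -> tuple[list[str], list[list[str]]]:
--     """Find the member/contracting parties table rows."""
--     for i, row in enumerate(all_rows):
--         row_lower = [c.lower() for c in row]
--         if any("member" in c for c in row_lower) and any(
--             kw in c for c in row_lower for kw in ("signature", "instrument", "in force")
--         ):
--             return row, all_rows[i + 1:]
--     # Fallback
--     for i, row in enumerate(all_rows):
--         row_lower = [c.lower() for c in row]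
--         if any("member" in c or "country" in c or "contracting" in c for c in row_lower):
--             return row, all_rows[i + 1:]
--     if all_rows:
--         return all_rows[0], all_rows[1:]
--     return [], []
-- ===== SOURCE B (Python) =====
-- def _classify(row):
--     """One pass over the cells: (is primary header row, is fallback header row)."""
--     has_member = has_kw = has_cc = False
--     for cell in row:
--         c = cell.lower()
--         has_member = has_member or "member" in c
--         has_kw = has_kw or "signature" in c or "instrument" in c or "in force" in c
--         has_cc = has_cc or "country" in c or "contracting" in c
--     return has_member and has_kw, has_member or has_cc
--
--
-- def _find_member_rows(all_rows):
--     """Find the member/contracting parties table rows (single pass)."""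
--     first_primary = None
--     first_fallback = None
--     for i, row in enumerate(all_rows):
--         primary, fallback = _classify(row)
--         if first_primary is None and primary:
--             first_primary = i
--         elif first_fallback is None and fallback:
--             first_fallback = i
--     if not all_rows:
--         return [], []
--     i = first_primary if first_primary is not None else (
--         first_fallback if first_fallback is not None else 0)
--     return all_rows[i], all_rows[i + 1:]
-- ===== Notes on version B (the rewrite author's own statement) =====
-- stated objective: alternative
-- what changed: Replaces A's two prioritized scans over all_rows (and two any-scans per row) by a single pass that records the first primary and first fallback index with one combined per-row cell scan, then slices once at the end.
import Mathlib
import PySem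

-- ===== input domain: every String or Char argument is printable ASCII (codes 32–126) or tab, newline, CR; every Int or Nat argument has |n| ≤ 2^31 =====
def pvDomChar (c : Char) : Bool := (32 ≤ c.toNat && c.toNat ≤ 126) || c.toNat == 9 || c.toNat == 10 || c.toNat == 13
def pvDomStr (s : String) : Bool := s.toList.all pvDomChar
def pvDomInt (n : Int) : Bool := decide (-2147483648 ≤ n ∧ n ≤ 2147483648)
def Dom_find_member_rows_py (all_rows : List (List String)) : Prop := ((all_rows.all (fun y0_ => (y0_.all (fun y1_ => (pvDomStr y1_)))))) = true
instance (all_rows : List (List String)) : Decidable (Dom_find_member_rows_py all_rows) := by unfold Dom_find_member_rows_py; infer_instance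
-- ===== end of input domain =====

-- B makes a single pass recording first primary/fallback indices (A scans twice); objective: alternative decomposition.

-- ===== PORT A =====
-- A's primary test on a row: some lowered cell contains "member" AND some lowered cell contains a keyword.
def rowPrimary (row : List String) : Bool :=
  let rl := row.map PySem.Str.lower
  (rl.any fun c => PySem.Str.isIn "member" c) &&
    (rl.any fun c => ["signature", "instrument", "in force"].any fun kw => PySem.Str.isIn kw c)

-- A's fallback test on a row.
def rowFallback (row : List String) : Bool :=
  (row.map PySem.Str.lower).any fun c =>
    PySem.Str.isIn "member" c || PySem.Str.isIn "country" c || PySem.Str.isIn "contracting" c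

-- A's first loop; 'rest' is exactly all_rows[i+1:] at the row where it returns.
def scanPrimary : List (List String) → Option (List String × List (List String))
  | [] => none
  | row :: rest => if rowPrimary row then some (row, rest) else scanPrimary rest

-- A's second (fallback) loop.
def scanFallback : List (List String) → Option (List String × List (List String))
  | [] => none
  | row :: rest => if rowFallback row then some (row, rest) else scanFallback rest

def find_member_rows_py (all_rows : List (List String)) : List String × List (List String) :=
  match scanPrimary all_rows with
  | some r => r
  | none =>
    match scanFallback all_rows with
    | some r => r
    | none =>
      match all_rows with
      | [] => ([], [])
      | h :: t => (h, t)

-- ===== PORT B =====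
-- Source B's _classify: one fold over the cells maintaining the three flags.
def classifyB (row : List String) : Bool × Bool :=
  let f := row.foldl
    (fun (st : Bool × Bool × Bool) cell =>
      let c := PySem.Str.lower cell
      (st.1 || PySem.Str.isIn "member" c,
       st.2.1 || (PySem.Str.isIn "signature" c || PySem.Str.isIn "instrument" c || PySem.Str.isIn "in force" c),
       st.2.2 || (PySem.Str.isIn "country" c || PySem.Str.isIn "contracting" c)))
    (false, false, false)
  (f.1 && f.2.1, f.1 || f.2.2)

-- Source B's loop body: update (first_primary, first_fallback).
def bStep (st : Option Int × Option Int) (p : Int × List String) : Option Int × Option Int :=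
  let cl := classifyB p.2
  if st.1.isNone && cl.1 then (some p.1, st.2)
  else if st.2.isNone && cl.2 then (st.1, some p.1)
  else st

def find_member_rows_py_alt (all_rows : List (List String)) : List String × List (List String) :=
  let st := (PySem.List.enumerate all_rows 0).foldl bStep (none, none)
  match all_rows with
  | [] => ([], [])
  | _ :: _ =>
    let i : Int :=
      match st.1 with
      | some i => i
      | none => match st.2 with | some j => j | none => 0
    (PySem.List.pyGetD all_rows i [], PySem.List.slice all_rows (some (i + 1)) none)

-- ===== PRECONDITION & SPEC =====
def Spec_find_member_rows_py (all_rows : List (List String)) (out : List String × List (List String)) : Prop := out = find_member_rows_py_alt all_rows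
instance (all_rows : List (List String)) (out : List String × List (List String)) : Decidable (Spec_find_member_rows_py all_rows out) := by unfold Spec_find_member_rows_py; infer_instance

-- ===== CLAIM (what is proved, stated in full; the proofs are below) =====
def Claim_equal_find_member_rows_py : Prop := ∀ (all_rows : List (List String)), Dom_find_member_rows_py all_rows → Spec_find_member_rows_py all_rows (find_member_rows_py all_rows)

-- ===== LEMMAS AND PROOFS =====

-- classifyB computes exactly A's two row predicates.
theorem classifyB_flags (row : List String) (b1 b2 b3 : Bool) :
    row.foldl
      (fun (st : Bool × Bool × Bool) cell =>
        let c := PySem.Str.lower cell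
        (st.1 || PySem.Str.isIn "member" c,
         st.2.1 || (PySem.Str.isIn "signature" c || PySem.Str.isIn "instrument" c || PySem.Str.isIn "in force" c),
         st.2.2 || (PySem.Str.isIn "country" c || PySem.Str.isIn "contracting" c)))
      (b1, b2, b3)
    = (b1 || ((row.map PySem.Str.lower).any fun c => PySem.Str.isIn "member" c),
       b2 || ((row.map PySem.Str.lower).any fun c => PySem.Str.isIn "signature" c || PySem.Str.isIn "instrument" c || PySem.Str.isIn "in force" c),
       b3 || ((row.map PySem.Str.lower).any fun c => PySem.Str.isIn "country" c || PySem.Str.isIn "contracting" c)) := by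
  induction row generalizing b1 b2 b3 with
  | nil => simp
  | cons h t ih =>
    simp only [List.foldl_cons, List.map_cons, List.any_cons, ih]
    simp [Bool.or_assoc]

theorem list_any_or {α : Type} (l : List α) (p q : α → Bool) :
    (l.any fun x => p x || q x) = (l.any p || l.any q) := by
  induction l with
  | nil => simp
  | cons h t ih => simp [ih, Bool.or_assoc, Bool.or_left_comm]

theorem classifyB_eq (row : List String) : classifyB row = (rowPrimary row, rowFallback row) := by
  unfold classifyB rowPrimary rowFallback
  rw [classifyB_flags]
  simp only [Bool.false_or, List.any_cons, List.any_nil, Bool.or_false, Prod.mk.injEq]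
  constructor
  · rw [show (fun c => PySem.Str.isIn "signature" c || PySem.Str.isIn "instrument" c || PySem.Str.isIn "in force" c)
          = (fun c => PySem.Str.isIn "signature" c || (PySem.Str.isIn "instrument" c || PySem.Str.isIn "in force" c))
        from funext fun c => by rw [Bool.or_assoc]]
  · rw [← list_any_or,
        show (fun c => PySem.Str.isIn "member" c || PySem.Str.isIn "country" c || PySem.Str.isIn "contracting" c)
          = (fun c => PySem.Str.isIn "member" c || (PySem.Str.isIn "country" c || PySem.Str.isIn "contracting" c))
        from funext fun c => by rw [Bool.or_assoc]]

-- Once first_primary is set, the fold never changes it.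
theorem bFold_fst_some (xs : List (List String)) (s i : Int) (st2 : Option Int) :
    ((PySem.List.enumerate xs s).foldl bStep (some i, st2)).1 = some i := by
  induction xs generalizing s st2 with
  | nil => simp [PySem.List.enumerate_nil]
  | cons h t ih =>
    rw [PySem.List.enumerate_cons, List.foldl_cons]
    by_cases hc : (st2.isNone && (classifyB h).2) = true <;> simp [bStep, hc, ih]

-- first_primary after the fold is the first index whose row satisfies rowPrimary.
theorem bFold_fst (xs : List (List String)) (s : Int) (st2 : Option Int) :
    ((PySem.List.enumerate xs s).foldl bStep (none, st2)).1
      = (xs.findIdx? rowPrimary).map (fun k => s + (k : Int)) := by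
  induction xs generalizing s st2 with
  | nil => simp [PySem.List.enumerate_nil]
  | cons h t ih =>
    rw [PySem.List.enumerate_cons, List.foldl_cons, List.findIdx?_cons]
    by_cases hp : rowPrimary h
    · simp [bStep, classifyB_eq, hp, bFold_fst_some]
    · by_cases hc : (st2.isNone && rowFallback h) = true <;>
        · simp only [bStep, classifyB_eq, hp, hc]
          simp [ih]
          cases t.findIdx? rowPrimary
          · simp
          · simp; omega

-- With no primary row anywhere, a set first_fallback is final.
theorem bFold_no_primary_frozen (xs : List (List String)) (s j : Int)
    (h : ∀ row ∈ xs, rowPrimary row = false) :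
    (PySem.List.enumerate xs s).foldl bStep (none, some j) = (none, some j) := by
  induction xs generalizing s with
  | nil => simp [PySem.List.enumerate_nil]
  | cons hd t ih =>
    rw [PySem.List.enumerate_cons, List.foldl_cons]
    have hp : rowPrimary hd = false := h hd (by simp)
    simp only [bStep, classifyB_eq, hp]
    simp [ih (s + 1) (fun x hx => h x (List.mem_cons_of_mem _ hx))]

-- With no primary row anywhere, first_fallback is the first fallback index.
theorem bFold_snd (xs : List (List String)) (s : Int)
    (h : ∀ row ∈ xs, rowPrimary row = false) :
    ((PySem.List.enumerate xs s).foldl bStep (none, none)).2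
      = (xs.findIdx? rowFallback).map (fun k => s + (k : Int)) := by
  induction xs generalizing s with
  | nil => simp [PySem.List.enumerate_nil]
  | cons hd t ih =>
    rw [PySem.List.enumerate_cons, List.foldl_cons, List.findIdx?_cons]
    have hp : rowPrimary hd = false := h hd (by simp)
    have ht : ∀ row ∈ t, rowPrimary row = false := fun x hx => h x (List.mem_cons_of_mem _ hx)
    by_cases hf : rowFallback hd
    · simp [bStep, classifyB_eq, hp, hf, bFold_no_primary_frozen t (s+1) s ht]
    · simp only [bStep, classifyB_eq, hp, hf]
      simp [ih (s + 1) ht]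
      cases t.findIdx? rowFallback
      · simp
      · simp; omega

-- A's loops characterized by findIdx?.
theorem scanPrimary_eq_some (xs : List (List String)) (k : Nat)
    (h : xs.findIdx? rowPrimary = some k) :
    scanPrimary xs = some (xs.getD k [], xs.drop (k + 1)) := by
  induction xs generalizing k with
  | nil => simp [List.findIdx?_nil] at h
  | cons hd t ih =>
    rw [List.findIdx?_cons] at h
    by_cases hp : rowPrimary hd
    · simp [hp] at h
      simp [scanPrimary, hp, ← h]
    · simp [hp] at h
      obtain ⟨k', hk', rfl⟩ := h
      simp [scanPrimary, hp, ih k' hk']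

theorem scanPrimary_eq_none (xs : List (List String))
    (h : xs.findIdx? rowPrimary = none) : scanPrimary xs = none := by
  induction xs with
  | nil => rfl
  | cons hd t ih =>
    rw [List.findIdx?_cons] at h
    by_cases hp : rowPrimary hd
    · simp [hp] at h
    · simp [hp] at h
      have hn := ih (by rw [List.findIdx?_eq_none_iff]; intro x hx; simp [h x hx])
      simp [scanPrimary, hp, hn]

theorem scanFallback_eq_some (xs : List (List String)) (k : Nat)
    (h : xs.findIdx? rowFallback = some k) :
    scanFallback xs = some (xs.getD k [], xs.drop (k + 1)) := by
  induction xs generalizing k with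
  | nil => simp [List.findIdx?_nil] at h
  | cons hd t ih =>
    rw [List.findIdx?_cons] at h
    by_cases hp : rowFallback hd
    · simp [hp] at h
      simp [scanFallback, hp, ← h]
    · simp [hp] at h
      obtain ⟨k', hk', rfl⟩ := h
      simp [scanFallback, hp, ih k' hk']

theorem scanFallback_eq_none (xs : List (List String))
    (h : xs.findIdx? rowFallback = none) : scanFallback xs = none := by
  induction xs with
  | nil => rfl
  | cons hd t ih =>
    rw [List.findIdx?_cons] at h
    by_cases hp : rowFallback hd
    · simp [hp] at h
    · simp [hp] at h
      have hn := ih (by rw [List.findIdx?_eq_none_iff]; intro x hx; simp [h x hx])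
      simp [scanFallback, hp, hn]

theorem natCast_succ_int (k : Nat) : ((k : Int) + 1) = ((k + 1 : Nat) : Int) := by push_cast; ring

-- ===== VERDICT (by name: the statement is the Claim_ definition above) =====
theorem find_member_rows_py_spec : Claim_equal_find_member_rows_py := by
  intro all_rows _
  unfold Spec_find_member_rows_py find_member_rows_py find_member_rows_py_alt
  cases all_rows with
  | nil => rfl
  | cons hd tl =>
    cases hp : (hd :: tl).findIdx? rowPrimary with
    | some k =>
      rw [scanPrimary_eq_some _ _ hp]
      have h1 : ((PySem.List.enumerate (hd :: tl) (0 : Int)).foldl bStep (none, none)).1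
          = some ((k : Nat) : Int) := by rw [bFold_fst, hp]; simp
      simp only []
      rw [h1]
      rw [natCast_succ_int, PySem.List.slice_from_natCast]
      simp [PySem.List.pyGetD_natCast]
    | none =>
      rw [scanPrimary_eq_none _ hp]
      have hnop : ∀ row ∈ (hd :: tl), rowPrimary row = false := by
        intro r hr
        have := List.findIdx?_eq_none_iff.mp hp r hr
        simpa using this
      have h1 : ((PySem.List.enumerate (hd :: tl) (0 : Int)).foldl bStep (none, none)).1 = none := by
        rw [bFold_fst, hp]; rfl
      cases hf : (hd :: tl).findIdx? rowFallback with
      | some k =>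
        rw [scanFallback_eq_some _ _ hf]
        have h2 : ((PySem.List.enumerate (hd :: tl) (0 : Int)).foldl bStep (none, none)).2
            = some ((k : Nat) : Int) := by rw [bFold_snd _ _ hnop, hf]; simp
        simp only []
        rw [h1, h2]
        rw [natCast_succ_int, PySem.List.slice_from_natCast]
        simp [PySem.List.pyGetD_natCast]
      | none =>
        rw [scanFallback_eq_none _ hf]
        have h2 : ((PySem.List.enumerate (hd :: tl) (0 : Int)).foldl bStep (none, none)).2 = none := by
          rw [bFold_snd _ _ hnop, hf]; rfl
        simp only []
        rw [h1, h2]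
        simp [PySem.List.pyGetD_zero_cons, PySem.List.slice_from_one]
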